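-- pv_equiv track=rewrite | github.com/AnnyOrange/biodino | dinov3/data/wds_pipeline.py | _find_image_key
-- ===== SOURCE A (Python) =====
-- from typing import Callable, List, Optional, Union
--
-- def _find_image_key(sample: dict) -> Optional[str]:
--     """Return the first supported image key found in a WebDataset sample dict."""
--     supported_keys = ("tiff", "tif", "npy")
--     for extension in supported_keys:
--         for key in sample:
--             lowered = key.lower()
--             if lowered == extension or lowered.endswith(f".{extension}"):
--                 return key
--     return None
-- ===== SOURCE B (Python) =====
-- def _match_index(lowered, supported_keys):
--     idx = 0
--     for ext in supported_keys:
--         if lowered == ext or lowered.endswith("." + ext):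
--             return idx
--         idx += 1
--     return idx
--
--
-- def _find_image_key(sample: dict):
--     """Return the first supported image key found in a WebDataset sample dict."""
--     supported_keys = ("tiff", "tif", "npy")
--     best_index = len(supported_keys)
--     best_key = None
--     for key in sample:
--         idx = _match_index(key.lower(), supported_keys)
--         if idx < best_index:
--             best_index = idx
--             best_key = key
--     return best_key
-- ===== Notes on version B (the rewrite author's own statement) =====
-- stated objective: alternative
-- what changed: Replaced the extension-outer nested scan (one full pass over the sample per extension, with early return) by a single pass over the keys that tracks the running minimum extension-priority winner.
import Mathlib
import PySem

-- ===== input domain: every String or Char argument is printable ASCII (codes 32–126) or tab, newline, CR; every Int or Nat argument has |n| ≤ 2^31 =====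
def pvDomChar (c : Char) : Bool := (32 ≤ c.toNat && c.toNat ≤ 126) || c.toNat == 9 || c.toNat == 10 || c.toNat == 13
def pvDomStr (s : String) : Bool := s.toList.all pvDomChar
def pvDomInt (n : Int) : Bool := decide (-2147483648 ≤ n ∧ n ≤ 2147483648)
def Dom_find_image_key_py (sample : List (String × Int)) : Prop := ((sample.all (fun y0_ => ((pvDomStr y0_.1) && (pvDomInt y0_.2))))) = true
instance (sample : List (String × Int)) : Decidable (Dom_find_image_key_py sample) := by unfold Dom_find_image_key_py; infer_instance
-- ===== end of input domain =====

-- ===== PORT A =====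
-- B replaces A's extension-outer nested scan by a single pass over the keys
-- tracking the minimum-priority winner (objective: alternative decomposition).

-- inner 'for key in sample' loop of A, for one extension (early return -> Option)
def pvInnerA (ext : String) : List (String × Int) → Option String
  | [] => none
  | kv :: rest =>
      let lowered := PySem.Str.lower kv.1
      if lowered == ext || PySem.Str.endswith lowered ("." ++ ext) then some kv.1
      else pvInnerA ext rest

-- outer 'for extension in supported_keys' loop of A
def pvOuterA (sample : List (String × Int)) : List String → Option String
  | [] => none
  | e :: es =>
      match pvInnerA e sample with
      | some k => some k
      | none => pvOuterA sample es

def find_image_key_py (sample : List (String × Int)) : Option String :=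
  pvOuterA sample ["tiff", "tif", "npy"]

-- ===== PORT B =====
-- _match_index: first matching extension's index, else len(supported_keys)
def pvMatchIdx (lowered : String) (idx : Nat) : List String → Nat
  | [] => idx
  | e :: es =>
      if lowered == e || PySem.Str.endswith lowered ("." ++ e) then idx
      else pvMatchIdx lowered (idx + 1) es

-- the single 'for key in sample' loop with state (best_index, best_key)
def pvLoopB (best : Nat × Option String) : List (String × Int) → Nat × Option String
  | [] => best
  | kv :: rest =>
      let idx := pvMatchIdx (PySem.Str.lower kv.1) 0 ["tiff", "tif", "npy"]
      if idx < best.1 then pvLoopB (idx, some kv.1) rest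
      else pvLoopB best rest

def find_image_key_py_alt (sample : List (String × Int)) : Option String :=
  (pvLoopB (3, none) sample).2

-- ===== PRECONDITION & SPEC =====
def Spec_find_image_key_py (sample : List (String × Int)) (out : Option String) : Prop := out = find_image_key_py_alt sample
instance (sample : List (String × Int)) (out : Option String) : Decidable (Spec_find_image_key_py sample out) := by unfold Spec_find_image_key_py; infer_instance

-- ===== CLAIM (what is proved, stated in full; the proofs are below) =====
def Claim_equal_find_image_key_py : Prop := ∀ (sample : List (String × Int)), Dom_find_image_key_py sample → Spec_find_image_key_py sample (find_image_key_py sample)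

-- ===== LEMMAS AND PROOFS =====

-- the match predicate both ports test (key lowered once)
def gMatch (e k : String) : Bool :=
  let l := PySem.Str.lower k
  l == e || PySem.Str.endswith l ("." ++ e)

-- reference form of A, generic in the extension list
def gA (l : List (String × Int)) : List String → Option String
  | [] => none
  | e :: es =>
      match l.find? (fun kv => gMatch e kv.1) with
      | some kv => some kv.1
      | none => gA l es

-- reference match index, generic in the extension list
def gM (k : String) : List String → Nat
  | [] => 0
  | e :: es => if gMatch e k then 0 else gM k es + 1

-- reference form of B's loop, generic in the index function
def gB (m : String → Nat) (best : Nat × Option String) : List (String × Int) → Nat × Option String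
  | [] => best
  | kv :: rest =>
      if m kv.1 < best.1 then gB m (m kv.1, some kv.1) rest
      else gB m best rest

theorem pvInnerA_eq (e : String) (l : List (String × Int)) :
    pvInnerA e l = (l.find? (fun kv => gMatch e kv.1)).map (·.1) := by
  induction l with
  | nil => rfl
  | cons kv rest ih =>
      by_cases h : (gMatch e kv.1 = true)
      · simp only [pvInnerA, List.find?_cons, h]
        simp only [gMatch] at h
        simp at h
        simp [h]
      · rw [Bool.not_eq_true] at h
        simp only [pvInnerA, List.find?_cons, h]
        simp only [gMatch] at h
        simp at h
        simp [h, ih]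

theorem pvOuterA_eq (l : List (String × Int)) (es : List String) :
    pvOuterA l es = gA l es := by
  induction es with
  | nil => rfl
  | cons e es ih =>
      simp only [pvOuterA, gA, pvInnerA_eq, ih]
      cases l.find? (fun kv => gMatch e kv.1) <;> simp

theorem pvMatchIdx_eq (k : String) (es : List String) :
    ∀ i, pvMatchIdx (PySem.Str.lower k) i es = i + gM k es := by
  induction es with
  | nil => intro i; simp [pvMatchIdx, gM]
  | cons e es ih =>
      intro i
      by_cases h : (gMatch e k = true)
      · simp only [pvMatchIdx, gM, h]
        simp only [gMatch] at h
        simp at h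
        simp [h]
      · rw [Bool.not_eq_true] at h
        simp only [pvMatchIdx, gM, h]
        simp only [gMatch] at h
        simp at h
        simp [h, ih]
        omega

theorem pvLoopB_eq (l : List (String × Int)) :
    ∀ best, pvLoopB best l = gB (fun k => gM k ["tiff", "tif", "npy"]) best l := by
  induction l with
  | nil => intro best; rfl
  | cons kv rest ih =>
      intro best
      simp only [pvLoopB, gB, pvMatchIdx_eq, Nat.zero_add]
      split_ifs <;> exact ih _

-- once best_index is 0, the state never changes
theorem gB_zero_stays (m : String → Nat) (l : List (String × Int)) :
    ∀ bk, gB m (0, bk) l = (0, bk) := by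
  induction l with
  | nil => intro bk; rfl
  | cons kv rest ih => intro bk; simp [gB, ih]

-- with positive best_index, the first key of index 0 wins
theorem gB_find_zero (m : String → Nat) (l : List (String × Int)) :
    ∀ b bk kv₀, 0 < b → l.find? (fun kv => m kv.1 == 0) = some kv₀ →
      (gB m (b, bk) l).2 = some kv₀.1 := by
  induction l with
  | nil => intro b bk kv₀ _ h; simp at h
  | cons kv rest ih =>
      intro b bk kv₀ hb h
      rw [List.find?_cons] at h
      by_cases hz : (m kv.1 == 0) = true
      · simp [hz] at h
        subst h
        have hm : m kv.1 = 0 := by simpa using hz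
        simp [gB, hm, hb, gB_zero_stays]
      · simp [hz] at h
        simp only [gB]
        split_ifs with hc
        · exact ih _ _ _ (by simp only [beq_iff_eq] at hz; omega) h
        · exact ih _ _ _ hb h
  -- conditional recursion: both branches keep best_index positive

-- shifting every index by one shifts the loop state by one
theorem gB_shift (m m' : String → Nat) (l : List (String × Int))
    (hm : ∀ kv ∈ l, m' kv.1 = m kv.1 + 1) :
    ∀ b bk, gB m' (b + 1, bk) l = ((gB m (b, bk) l).1 + 1, (gB m (b, bk) l).2) := by
  induction l with
  | nil => intro b bk; rfl
  | cons kv rest ih =>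
      intro b bk
      have hkv : m' kv.1 = m kv.1 + 1 := hm kv (by simp)
      have hrest : ∀ kv' ∈ rest, m' kv'.1 = m kv'.1 + 1 := fun kv' h => hm kv' (by simp [h])
      simp only [gB, hkv]
      by_cases hc : m kv.1 < b
      · simp [hc, ih hrest]
      · simp [hc, ih hrest]

theorem gA_eq_gB (es : List String) (l : List (String × Int)) :
    gA l es = (gB (fun k => gM k es) (es.length, none) l).2 := by
  induction es with
  | nil =>
      simp only [gA, List.length_nil]
      rw [show (fun k => gM k ([] : List String)) = fun _ => 0 from rfl, gB_zero_stays]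
  | cons e es ih =>
      simp only [gA]
      have hpred : (fun kv : String × Int => gM kv.1 (e :: es) == 0)
                 = (fun kv : String × Int => gMatch e kv.1) := by
        funext kv
        simp only [gM]
        by_cases h : gMatch e kv.1 = true <;> simp [h]
      cases hf : l.find? (fun kv => gMatch e kv.1) with
      | some kv₀ =>
          rw [gB_find_zero _ _ _ _ kv₀ (by simp) (by rw [hpred]; exact hf)]
      | none =>
          have hnone : ∀ kv ∈ l, gMatch e kv.1 = false := by
            intro kv hkv
            have := List.find?_eq_none.mp hf kv hkv
            simpa using this
          have hshift : ∀ kv ∈ l, gM kv.1 (e :: es) = gM kv.1 es + 1 := by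
            intro kv hkv
            simp [gM, hnone kv hkv]
          rw [ih, show (e :: es).length = es.length + 1 from rfl,
             gB_shift (fun k => gM k es) (fun k => gM k (e :: es)) l hshift]

-- ===== VERDICT (by name: the statement is the Claim_ definition above) =====
theorem find_image_key_py_spec : Claim_equal_find_image_key_py := by
  intro sample _
  unfold Spec_find_image_key_py find_image_key_py find_image_key_py_alt
  rw [pvOuterA_eq, pvLoopB_eq]
  exact gA_eq_gB _ sample
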